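-- pv_equiv track=rewrite | github.com/BRMonte/CodeWars | python/loneliest_character.py | loneliest
-- ===== SOURCE A (Python) =====
-- def loneliest(s):
--     trimmed_string = s.strip()
--     space_counts = {}
--     length = len(trimmed_string)
--
--     for i in range(length):
--         char = trimmed_string[i]
--         if char.isalpha():
--             left_spaces = 0
--             for j in range(i - 1, -1, -1):
--                 if trimmed_string[j].isalpha():
--                     break
--                 left_spaces += 1
--
--             right_spaces = 0
--             for j in range(i + 1, length):
--                 if trimmed_string[j].isalpha():
--                     break
--                 right_spaces += 1
--
--             if char in space_counts:
--                 space_counts[char] += left_spaces + right_spaces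
--             else:
--                 space_counts[char] = left_spaces + right_spaces
--
--     max_space_count = max(space_counts.values(), default=0)
--     return [char for char, count in space_counts.items() if count == max_space_count]
-- ===== SOURCE B (Python) =====
-- def loneliest(s):
--     ts = s.strip()
--     n = len(ts)
--     # left[i]: run of non-alpha chars immediately left of i (one forward pass)
--     left = []
--     run = 0
--     for c in ts:
--         left.append(run)
--         run = 0 if c.isalpha() else run + 1
--     # right[i]: run of non-alpha chars immediately right of i (one backward pass)
--     right = [0] * n
--     run = 0
--     for i in range(n - 1, -1, -1):
--         right[i] = run
--         run = 0 if ts[i].isalpha() else run + 1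
--     counts = {}
--     for i in range(n):
--         c = ts[i]
--         if c.isalpha():
--             counts[c] = counts.get(c, 0) + left[i] + right[i]
--     best = max(counts.values(), default=0)
--     return [c for c, v in counts.items() if v == best]
-- ===== Notes on version B (the rewrite author's own statement) =====
-- stated objective: faster
-- what changed: Replaced the per-letter left/right rescans (quadratic in run length) by two linear passes that precompute, for every position, the run of non-alpha characters to its left and to its right, then a single accumulation pass.
import Mathlib
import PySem

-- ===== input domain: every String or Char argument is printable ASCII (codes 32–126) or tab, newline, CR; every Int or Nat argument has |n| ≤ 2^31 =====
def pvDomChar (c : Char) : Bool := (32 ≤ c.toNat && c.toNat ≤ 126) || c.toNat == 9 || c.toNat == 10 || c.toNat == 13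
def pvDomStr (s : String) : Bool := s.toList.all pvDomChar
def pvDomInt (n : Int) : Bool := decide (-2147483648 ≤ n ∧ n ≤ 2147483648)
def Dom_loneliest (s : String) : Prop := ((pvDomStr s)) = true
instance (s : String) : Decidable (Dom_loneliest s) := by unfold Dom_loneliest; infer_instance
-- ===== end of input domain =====

-- B replaces A's per-letter left/right rescans by two linear precomputed run-length passes (O(n) vs O(n^2)).

-- ===== PORT A =====
-- inner loop 'for j in range(i-1,-1,-1): break on alpha else count' — structural recursion down the index
def pvScanLeft (ts : List Char) : Nat → Int
  | 0 => 0
  | i+1 => if PySem.Chars.isalpha (ts.getD i ' ') then 0 else pvScanLeft ts i + 1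

-- inner loop 'for j in range(i+1, length): break on alpha else count' — recursion up the index
def pvScanRight (ts : List Char) (j : Nat) : Int :=
  if _h : j < ts.length then
    (if PySem.Chars.isalpha (ts.getD j ' ') then 0 else pvScanRight ts (j+1) + 1)
  else 0
termination_by ts.length - j

def loneliest (s : String) : List String :=
  let ts := (PySem.Str.strip s).toList
  let n := ts.length
  -- 'for i in range(length)': indices 0..n-1 (all nonnegative), folded over List.range n
  let counts := (List.range n).foldl (fun (d : PySem.Dict Char Int) i =>
      let c := ts.getD i ' '
      if PySem.Chars.isalpha c then
        let v := pvScanLeft ts i + pvScanRight ts (i+1)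
        if d.contains c then d.insert c (d.getD c 0 + v) else d.insert c v
      else d) PySem.Dict.empty
  let m := (PySem.List.max? counts.values (fun x => x)).getD 0
  (counts.items.filter (fun p => p.2 == m)).map (fun p => String.mk [p.1])

-- ===== PORT B =====
-- forward pass: left[i] = run of non-alpha chars immediately left of i
def pvLeftRuns : List Char → Int → List Int
  | [], _ => []
  | c :: rest, run => run :: pvLeftRuns rest (if PySem.Chars.isalpha c then 0 else run + 1)

-- backward pass 'for i in range(n-1,-1,-1)': recursion on the suffix, returns (right array, run so far)
def pvRightRuns : List Char → List Int × Int
  | [] => ([], 0)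
  | c :: rest =>
    let p := pvRightRuns rest
    (p.2 :: p.1, if PySem.Chars.isalpha c then 0 else p.2 + 1)

def loneliest_alt (s : String) : List String :=
  let ts := (PySem.Str.strip s).toList
  let n := ts.length
  let left := pvLeftRuns ts 0
  let right := (pvRightRuns ts).1
  let counts := (List.range n).foldl (fun (d : PySem.Dict Char Int) i =>
      let c := ts.getD i ' '
      if PySem.Chars.isalpha c then
        d.insert c (d.getD c 0 + (left.getD i 0 + right.getD i 0))
      else d) PySem.Dict.empty
  let m := (PySem.List.max? counts.values (fun x => x)).getD 0
  (counts.items.filter (fun p => p.2 == m)).map (fun p => String.mk [p.1])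

-- ===== PRECONDITION & SPEC =====
def Spec_loneliest (s : String) (out : List String) : Prop := out = loneliest_alt s
instance (s : String) (out : List String) : Decidable (Spec_loneliest s out) := by unfold Spec_loneliest; infer_instance

-- ===== CLAIM (what is proved, stated in full; the proofs are below) =====
def Claim_equal_loneliest : Prop := ∀ (s : String), Dom_loneliest s → Spec_loneliest s (loneliest s)

-- ===== LEMMAS AND PROOFS =====

-- left-run recurrence with an arbitrary seed (the running accumulator of B's forward pass)
def pvDSeed (l : List Char) (run : Int) : Nat → Int
  | 0 => run
  | i+1 => if PySem.Chars.isalpha (l.getD i ' ') then 0 else pvDSeed l run i + 1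

lemma pvDSeed_zero (l : List Char) (i : Nat) : pvDSeed l 0 i = pvScanLeft l i := by
  induction i with
  | zero => rfl
  | succ i ih => simp [pvDSeed, pvScanLeft, ih]

lemma pvDSeed_cons (c : Char) (l : List Char) (run : Int) (i : Nat) :
    pvDSeed (c :: l) run (i+1) = pvDSeed l (if PySem.Chars.isalpha c then 0 else run + 1) i := by
  induction i generalizing run with
  | zero => simp [pvDSeed]
  | succ i ih => simp only [pvDSeed, List.getD_cons_succ] at *; rw [ih]

lemma pvLeftRuns_getD (l : List Char) (run : Int) (i : Nat) (h : i < l.length) :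
    (pvLeftRuns l run).getD i 0 = pvDSeed l run i := by
  induction l generalizing run i with
  | nil => simp at h
  | cons c rest ih =>
    cases i with
    | zero => rfl
    | succ i =>
      simp only [pvLeftRuns, List.getD_cons_succ]
      rw [ih _ _ (by simpa using h), pvDSeed_cons]

lemma pvScanRight_cons (k : Nat) (c : Char) (l : List Char) (j : Nat) (hk : l.length - j ≤ k) :
    pvScanRight (c :: l) (j+1) = pvScanRight l j := by
  induction k generalizing j with
  | zero =>
    have hj : ¬ j < l.length := by omega
    conv_lhs => rw [pvScanRight]
    conv_rhs => rw [pvScanRight]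
    simp [hj]
  | succ k ih =>
    conv_lhs => rw [pvScanRight]
    conv_rhs => rw [pvScanRight]
    by_cases h : j < l.length
    · simp only [show j + 1 < (c :: l).length by simp; omega, dif_pos, h,
        List.getD_cons_succ]
      rw [ih (j+1) (by omega)]
    · simp [h]

lemma pvRightRuns_spec (l : List Char) :
    (pvRightRuns l).2 = pvScanRight l 0 ∧
    ∀ i, i < l.length → (pvRightRuns l).1.getD i 0 = pvScanRight l (i+1) := by
  induction l with
  | nil =>
    refine ⟨?_, by intro i hi; simp at hi⟩
    rw [pvScanRight]; simp [pvRightRuns]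
  | cons c rest ih =>
    obtain ⟨h2, h1⟩ := ih
    have hshift : ∀ j, pvScanRight (c :: rest) (j+1) = pvScanRight rest j :=
      fun j => pvScanRight_cons rest.length c rest j (by omega)
    constructor
    · show (if PySem.Chars.isalpha c then 0 else (pvRightRuns rest).2 + 1) = _
      rw [pvScanRight]
      simp only [List.length_cons, show (0:Nat) < rest.length + 1 by omega, dif_pos,
        List.getD_cons_zero, hshift 0, h2]
    · intro i hi
      cases i with
      | zero => show (pvRightRuns rest).2 = _; rw [h2, hshift 0]
      | succ i =>
        show (pvRightRuns rest).1.getD i 0 = _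
        rw [h1 i (by simpa using hi), hshift (i+1)]

lemma pvDictStep (d : PySem.Dict Char Int) (c : Char) (v : Int) :
    (if d.contains c then d.insert c (d.getD c 0 + v) else d.insert c v) =
    d.insert c (d.getD c 0 + v) := by
  by_cases h : d.contains c = true
  · simp [h]
  · have hnone : d.get? c = none :=
      (PySem.Dict.get?_eq_none_iff_contains d c).mpr (by simpa using h)
    simp [h, PySem.Dict.getD, hnone]

-- ===== VERDICT (by name: the statement is the Claim_ definition above) =====
theorem loneliest_spec : Claim_equal_loneliest := by
  intro s _
  show loneliest s = loneliest_alt s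
  unfold loneliest loneliest_alt
  set ts := (PySem.Str.strip s).toList with hts
  obtain ⟨-, hright⟩ := pvRightRuns_spec ts
  have hfold : (List.range ts.length).foldl (fun (d : PySem.Dict Char Int) i =>
      let c := ts.getD i ' '
      if PySem.Chars.isalpha c then
        let v := pvScanLeft ts i + pvScanRight ts (i+1)
        if d.contains c then d.insert c (d.getD c 0 + v) else d.insert c v
      else d) PySem.Dict.empty
    = (List.range ts.length).foldl (fun (d : PySem.Dict Char Int) i =>
      let c := ts.getD i ' '
      if PySem.Chars.isalpha c then
        d.insert c (d.getD c 0 + ((pvLeftRuns ts 0).getD i 0 + (pvRightRuns ts).1.getD i 0))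
      else d) PySem.Dict.empty := by
    apply PySem.List.foldl_congr_mem
    intro d i hi
    have hlt : i < ts.length := List.mem_range.mp hi
    have hL : (pvLeftRuns ts 0).getD i 0 = pvScanLeft ts i := by
      rw [pvLeftRuns_getD ts 0 i hlt, pvDSeed_zero]
    have hR := hright i hlt
    simp only [List.getD] at hL hR ⊢
    rw [hL, hR]
    by_cases ha : PySem.Chars.isalpha (ts[i]?.getD ' ') = true
    · rw [if_pos ha, if_pos ha]
      exact pvDictStep d _ _
    · rw [if_neg ha, if_neg ha]
  simp only [hfold]
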